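-- pv_equiv track=rewrite | github.com/Pacooral/CS61A-2018 | homework/hw04/hw04.py | has_seven
-- ===== SOURCE A (Python) =====
-- def has_seven(k):
--     """Returns True if at least one of the digits of k is a 7, False otherwise.
--
--     >>> has_seven(3)
--     False
--     >>> has_seven(7)
--     True
--     >>> has_seven(2734)
--     True
--     >>> has_seven(2634)
--     False
--     >>> has_seven(734)
--     True
--     >>> has_seven(7777)
--     True
--     """
--     if k % 10 == 7:
--         return True
--     elif k < 10:
--         return False
--     elif k%7==0:
--         return True
--     else:
--         return has_seven(k // 10)
-- ===== SOURCE B (Python) =====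
-- def has_seven(k):
--     # Materialize the decimal truncations of k, then scan them with the
--     # original checks in order (including the k%7==0 quirk).
--     prefixes = [k]
--     while prefixes[-1] >= 10:
--         prefixes.append(prefixes[-1] // 10)
--     for p in prefixes:
--         if p % 10 == 7:
--             return True
--         if p < 10:
--             return False
--         if p % 7 == 0:
--             return True
--     return False  # unreachable: the last prefix is < 10
-- ===== Notes on version B (the rewrite author's own statement) =====
-- stated objective: alternative
-- what changed: Replaces A's recursion with a two-phase iterative version: first materialize the list of decimal truncations of k with a while loop, then scan that list applying the same three checks in order.
import Mathlib
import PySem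

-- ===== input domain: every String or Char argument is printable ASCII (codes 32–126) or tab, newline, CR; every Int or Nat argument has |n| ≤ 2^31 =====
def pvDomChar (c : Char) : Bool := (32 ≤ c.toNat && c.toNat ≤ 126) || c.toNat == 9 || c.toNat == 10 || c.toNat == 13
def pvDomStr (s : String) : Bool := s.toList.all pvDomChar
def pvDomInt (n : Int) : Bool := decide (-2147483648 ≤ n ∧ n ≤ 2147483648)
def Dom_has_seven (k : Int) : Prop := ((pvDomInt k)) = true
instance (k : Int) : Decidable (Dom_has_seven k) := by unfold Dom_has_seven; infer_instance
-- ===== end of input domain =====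

-- B replaces A's recursion with two phases — build the list of decimal truncations, then scan it — same values, no speed claim.


-- ===== PORT A =====
def has_seven (k : Int) : Bool :=
  if PySem.Int.mod k 10 == 7 then true
  else if k < 10 then false
  else if PySem.Int.mod k 7 == 0 then true
  else has_seven (PySem.Int.floordiv k 10)
termination_by k.toNat
decreasing_by
  rename_i h1 h2
  rw [PySem.Int.floordiv_eq_ediv_of_pos (by omega)]
  omega

-- ===== PORT B =====
-- the while loop building `prefixes` (appends p // 10 while the last entry is ≥ 10)
def buildPrefixes (p : Int) : List Int :=
  p :: (if 10 ≤ p then buildPrefixes (PySem.Int.floordiv p 10) else [])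
termination_by p.toNat
decreasing_by
  rename_i h
  rw [PySem.Int.floordiv_eq_ediv_of_pos (by omega)]
  omega

-- the for loop scanning `prefixes` with the three checks in order
def scanPrefixes : List Int → Bool
  | [] => false
  | p :: rest =>
    if PySem.Int.mod p 10 == 7 then true
    else if p < 10 then false
    else if PySem.Int.mod p 7 == 0 then true
    else scanPrefixes rest

def has_seven_alt (k : Int) : Bool := scanPrefixes (buildPrefixes k)

-- ===== PRECONDITION & SPEC =====
def Spec_has_seven (k : Int) (out : Bool) : Prop := out = has_seven_alt k
instance (k : Int) (out : Bool) : Decidable (Spec_has_seven k out) := by unfold Spec_has_seven; infer_instance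

-- ===== CLAIM (what is proved, stated in full; the proofs are below) =====
def Claim_equal_has_seven : Prop := ∀ (k : Int), Dom_has_seven k → Spec_has_seven k (has_seven k)

-- ===== LEMMAS AND PROOFS =====
theorem scan_build_eq (k : Int) : scanPrefixes (buildPrefixes k) = has_seven k := by
  rw [buildPrefixes, has_seven, scanPrefixes]
  split_ifs with h1 h2 h3 h4
  · rfl
  · rfl
  · rfl
  · exact scan_build_eq (PySem.Int.floordiv k 10)
  · omega
termination_by k.toNat
decreasing_by
  rw [PySem.Int.floordiv_eq_ediv_of_pos (by omega)]
  omega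

-- ===== VERDICT (by name: the statement is the Claim_ definition above) =====
theorem has_seven_spec : Claim_equal_has_seven := by
  intro k _
  unfold Spec_has_seven has_seven_alt
  exact (scan_build_eq k).symm
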